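-- pv_equiv track=rewrite | github.com/namehash/ens-label-inspector | label_inspector/components/font_support.py | aggregate_font_support
-- ===== SOURCE A (Python) =====
-- from typing import Optional
--
-- def aggregate_font_support(support_levels: list[Optional[bool]]) -> Optional[bool]:
--     '''
--     Aggregate font support levels.
--     Returns `True` if all supported, `False` if at least one unsupported, `None` otherwise.
--     '''
--     unknown = False
--     for level in support_levels:
--         if level is None:
--             unknown = True
--         elif not level:
--             return False
--     return None if unknown else True
-- ===== SOURCE B (Python) =====
-- from typing import Optional
--
-- def aggregate_font_support(support_levels: list[Optional[bool]]) -> Optional[bool]: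
--     unknown = any(l is None for l in support_levels)
--     if all(l for l in support_levels if l is not None):
--         return None if unknown else True
--     return False
-- ===== Notes on version B (the rewrite author's own statement) =====
-- stated objective: simpler
-- what changed: Replaces the flag-carrying early-return loop with two declarative scans: any() to detect unknowns and all() over the non-None values, then a direct tri-state return.
import Mathlib
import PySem

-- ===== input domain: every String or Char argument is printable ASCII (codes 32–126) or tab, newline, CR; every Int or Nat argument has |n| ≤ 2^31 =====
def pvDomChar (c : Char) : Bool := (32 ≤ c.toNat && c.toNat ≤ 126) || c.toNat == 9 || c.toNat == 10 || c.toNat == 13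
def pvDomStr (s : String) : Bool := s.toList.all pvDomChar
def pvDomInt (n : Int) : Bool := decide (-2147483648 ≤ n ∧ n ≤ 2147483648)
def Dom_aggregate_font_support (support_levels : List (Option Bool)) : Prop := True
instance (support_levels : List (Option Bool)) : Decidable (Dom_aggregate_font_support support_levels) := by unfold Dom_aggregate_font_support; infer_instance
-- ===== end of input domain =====

-- ===== PORT A =====
-- flag-carrying loop with early return, transliterated as structural recursion over the list
def aggLoopA : List (Option Bool) → Bool → Option Bool
  | [], unknown => if unknown then none else some true
  | level :: rest, unknown =>
    match level with
    | none => aggLoopA rest true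
    | some b => if !b then some false else aggLoopA rest unknown

def aggregate_font_support (support_levels : List (Option Bool)) : Option Bool :=
  aggLoopA support_levels false

-- ===== PORT B =====
-- B: `any` for unknowns, `all` over the non-None values (filterMap id = the comprehension filter)
def aggregate_font_support_alt (support_levels : List (Option Bool)) : Option Bool :=
  let unknown := support_levels.any Option.isNone
  if (support_levels.filterMap id).all (fun b => b) then
    (if unknown then none else some true)
  else some false

-- ===== PRECONDITION & SPEC =====
def Spec_aggregate_font_support (support_levels : List (Option Bool)) (out : Option Bool) : Prop := out = aggregate_font_support_alt support_levels
instance (support_levels : List (Option Bool)) (out : Option Bool) : Decidable (Spec_aggregate_font_support support_levels out) := by unfold Spec_aggregate_font_support; infer_instance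

-- ===== CLAIM (what is proved, stated in full; the proofs are below) =====
def Claim_equal_aggregate_font_support : Prop := ∀ (support_levels : List (Option Bool)), Dom_aggregate_font_support support_levels → Spec_aggregate_font_support support_levels (aggregate_font_support support_levels)

-- ===== LEMMAS AND PROOFS =====

-- ===== VERDICT (by name: the statement is the Claim_ definition above) =====
theorem aggLoopA_char (ls : List (Option Bool)) (u : Bool) :
    aggLoopA ls u =
      if (ls.filterMap id).all (fun b => b) then
        (if u || ls.any Option.isNone then none else some true)
      else some false := by
  induction ls generalizing u with
  | nil => simp [aggLoopA]
  | cons l rest ih =>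
    cases l with
    | none => simp [aggLoopA, ih]
    | some b =>
      cases b <;> simp [aggLoopA, ih, List.any_cons]

theorem aggregate_font_support_spec : Claim_equal_aggregate_font_support := by
  intro ls _
  unfold Spec_aggregate_font_support aggregate_font_support aggregate_font_support_alt
  simp [aggLoopA_char]
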